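-- pv_equiv track=rewrite | github.com/babenyshevs/bioinformatics | src/features/string_reconstruction.py | debruijn_from_pair
-- ===== SOURCE A (Python) =====
-- def debruijn_from_pair(d, pairs):
--     """
--     Construct the de Bruijn graph from a set of pairs with gap d.
--     Input: A collection of k-mers pair tupples.
--     Output: The adjacency list of the de Bruijn graph DeBruijn.
--     """
--     g = []
--     # build a prefixing pattern dict
--     dprefix = {}
--     for e, f in pairs:
--         prefix = (e[:-1], f[:-1])
--         suffix = (e[1:], f[1:])
--         dprefix.setdefault(prefix, []).append(suffix)
--     # build lexicographically sorted adjacency list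
--     for k in sorted(dprefix.keys()):
--         g.append((k, sorted(dprefix[k])))
--     return g
-- ===== SOURCE B (Python) =====
-- def debruijn_from_pair(d, pairs):
--     """
--     Sort-first/group-adjacent re-implementation: flatten every read-pair to a
--     ((prefix), (suffix)) item, sort the items once by the whole nested tuple,
--     then sweep the sorted list in a single pass keeping the currently open
--     group, flushing it whenever the prefix changes.
--     """
--     items = sorted(((e[:-1], f[:-1]), (e[1:], f[1:])) for e, f in pairs)
--     g = []
--     cur = None  # the open group: (prefix, suffixes collected so far)
--     for prefix, suffix in items:
--         if cur is not None and cur[0] == prefix: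
--             cur = (cur[0], cur[1] + [suffix])
--         else:
--             if cur is not None:
--                 g.append(cur)
--             cur = (prefix, [suffix])
--     if cur is not None:
--         g.append(cur)
--     return g
-- ===== Notes on version B (the rewrite author's own statement) =====
-- stated objective: alternative
-- what changed: Replaces A's hash-dict grouping followed by sorting the keys and each suffix list with one full sort of the flat (prefix, suffix) items and a single adjacent-grouping sweep that flushes the open group when the prefix changes.
import Mathlib
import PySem

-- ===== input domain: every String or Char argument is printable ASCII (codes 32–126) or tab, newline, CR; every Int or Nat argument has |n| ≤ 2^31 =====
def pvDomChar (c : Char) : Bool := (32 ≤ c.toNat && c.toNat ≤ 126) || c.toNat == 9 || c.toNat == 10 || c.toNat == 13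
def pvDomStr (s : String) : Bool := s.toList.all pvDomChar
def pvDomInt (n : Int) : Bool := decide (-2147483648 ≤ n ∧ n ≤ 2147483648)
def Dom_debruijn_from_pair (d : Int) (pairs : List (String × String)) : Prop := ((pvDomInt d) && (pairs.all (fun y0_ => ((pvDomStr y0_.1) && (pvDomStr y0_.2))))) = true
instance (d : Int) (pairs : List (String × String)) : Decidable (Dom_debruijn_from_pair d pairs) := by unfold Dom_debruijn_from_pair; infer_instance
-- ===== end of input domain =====

-- B replaces A's dict-grouping-then-sort-each-group by one full sort of the flat
-- (prefix, suffix) items followed by a single adjacent-grouping sweep (alternative decomposition, same cost class).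


-- ===== PORT A =====
-- dprefix.setdefault(prefix, []).append(suffix) is dp.modify prefix [] (· ++ [suffix]);
-- sorted() on pairs of strings compares Python tuples, i.e. first component then second: sorted2.
def debruijn_from_pair (d : Int) (pairs : List (String × String)) : List ((String × String) × (List (String × String))) :=
  let dprefix : PySem.Dict (String × String) (List (String × String)) :=
    pairs.foldl (fun dp ef =>
      dp.modify (PySem.Str.slice ef.1 none (some (-1)), PySem.Str.slice ef.2 none (some (-1))) []
        (fun v => v ++ [(PySem.Str.slice ef.1 (some 1) none, PySem.Str.slice ef.2 (some 1) none)])) PySem.Dict.empty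
  (PySem.List.sorted2 dprefix.keys (·.1) (·.2)).foldl
    (fun g k => g ++ [(k, PySem.List.sorted2 (dprefix.getD k []) (·.1) (·.2))]) []

-- ===== PORT B =====
-- one flat item ((e[:-1], f[:-1]), (e[1:], f[1:])) per read-pair
def pvItem (ef : String × String) : (String × String) × (String × String) :=
  ((PySem.Str.slice ef.1 none (some (-1)), PySem.Str.slice ef.2 none (some (-1))),
   (PySem.Str.slice ef.1 (some 1) none, PySem.Str.slice ef.2 (some 1) none))

-- Python's lexicographic order on the nested ((str,str),(str,str)) tuple, encoded exactly
-- (and injectively) into Mathlib's Lex order so that sorted(items) is PySem.List.sorted with this key.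
def pvKey4 (x : (String × String) × (String × String)) :
    Lex (Lex (String × String) × Lex (String × String)) :=
  toLex (toLex x.1, toLex x.2)

-- the loop body of B's sweep: state = (finished groups, currently open group)
def pvStep (st : List ((String × String) × (List (String × String))) × Option ((String × String) × (List (String × String))))
    (pv : (String × String) × (String × String)) :
    List ((String × String) × (List (String × String))) × Option ((String × String) × (List (String × String))) :=
  match st.2 with
  | some c => if c.1 == pv.1 then (st.1, some (c.1, c.2 ++ [pv.2])) else (st.1 ++ [c], some (pv.1, [pv.2]))
  | none => (st.1, some (pv.1, [pv.2]))

-- the final 'if cur is not None: g.append(cur)'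
def pvFin (st : List ((String × String) × (List (String × String))) × Option ((String × String) × (List (String × String)))) :
    List ((String × String) × (List (String × String))) :=
  match st.2 with
  | none => st.1
  | some c => st.1 ++ [c]

def debruijn_from_pair_alt (d : Int) (pairs : List (String × String)) : List ((String × String) × (List (String × String))) :=
  pvFin ((PySem.List.sorted (pairs.map pvItem) pvKey4).foldl pvStep ([], none))

-- ===== PRECONDITION & SPEC =====
def Spec_debruijn_from_pair (d : Int) (pairs : List (String × String)) (out : List ((String × String) × (List (String × String)))) : Prop := out = debruijn_from_pair_alt d pairs
instance (d : Int) (pairs : List (String × String)) (out : List ((String × String) × (List (String × String)))) : Decidable (Spec_debruijn_from_pair d pairs out) := by unfold Spec_debruijn_from_pair; infer_instance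

-- ===== CLAIM =====
def Claim_equal_debruijn_from_pair : Prop := ∀ (d : Int) (pairs : List (String × String)), Dom_debruijn_from_pair d pairs → Spec_debruijn_from_pair d pairs (debruijn_from_pair d pairs)

-- ===== LEMMAS AND PROOFS =====

-- the sorted distinct prefixes and the sorted suffix group of a prefix (A's building blocks)
def pvKeys (items : List ((String × String) × (String × String))) : List (String × String) :=
  PySem.List.sorted2 (PySem.Set.ofList (items.map Prod.fst)) (·.1) (·.2)

def pvVals (items : List ((String × String) × (String × String))) (k : String × String) : List (String × String) :=
  PySem.List.sorted2 ((items.filter (fun q => q.1 == k)).map Prod.snd) (·.1) (·.2)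

def pvCanon (items : List ((String × String) × (String × String))) : List ((String × String) × (String × String)) :=
  (pvKeys items).flatMap (fun k => (pvVals items k).map (fun v => (k, v)))

-- sorted2 (Python tuple key) IS sorted with the Lex-encoded pair key
theorem pv_sorted2_eq_sorted_toLex {α κ₁ κ₂ : Type} [LinearOrder κ₁] [LinearOrder κ₂]
    (xs : List α) (k1 : α → κ₁) (k2 : α → κ₂) :
    PySem.List.sorted2 xs k1 k2 = PySem.List.sorted xs (fun x => toLex (k1 x, k2 x)) := by
  unfold PySem.List.sorted2 PySem.List.sorted
  simp only [if_neg (by decide : ¬ (false = true))]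
  have hb : (fun a b => decide (k1 a < k1 b) || (!decide (k1 b < k1 a) && decide (k2 a < k2 b)))
      = (fun a b => decide (toLex (k1 a, k2 a) < toLex (k1 b, k2 b))) := by
    funext a b
    rcases lt_trichotomy (k1 a) (k1 b) with h | h | h
    · simp [h, Prod.Lex.toLex_lt_toLex]
    · simp [h, Prod.Lex.toLex_lt_toLex]
    · simp [h, h.asymm, h.ne', Prod.Lex.toLex_lt_toLex]
  rw [hb]

theorem pv_pvKey4_injective : Function.Injective pvKey4 := by
  intro x y h
  unfold pvKey4 at h
  have h' := congrArg ofLex h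
  have h1 := congrArg Prod.fst h'
  have h2 := congrArg Prod.snd h'
  exact Prod.ext (congrArg ofLex h1) (congrArg ofLex h2)

-- A's value, characterised (same chain of rewrites as the Dict lemmas give)
theorem pv_a_char (d : Int) (pairs : List (String × String)) :
    debruijn_from_pair d pairs
      = (pvKeys (pairs.map pvItem)).map (fun k => (k, pvVals (pairs.map pvItem) k)) := by
  unfold debruijn_from_pair
  rw [PySem.List.foldl_append_singleton_eq_map, List.nil_append]
  have hfold : pairs.foldl (fun dp ef =>
      dp.modify (PySem.Str.slice ef.1 none (some (-1)), PySem.Str.slice ef.2 none (some (-1))) []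
        (fun v => v ++ [(PySem.Str.slice ef.1 (some 1) none, PySem.Str.slice ef.2 (some 1) none)])) PySem.Dict.empty
      = (pairs.map pvItem).foldl (fun dp p => dp.modify p.1 [] (fun v => v ++ [p.2])) PySem.Dict.empty := by
    rw [List.foldl_map]; rfl
  rw [hfold]
  have hkeys : ((pairs.map pvItem).foldl (fun dp p => dp.modify p.1 [] (fun v => v ++ [p.2])) PySem.Dict.empty).keys
      = PySem.Set.ofList ((pairs.map pvItem).map Prod.fst) := by
    rw [PySem.Dict.keys_foldl_modify_key (key := Prod.fst) (f := fun _ p => fun v => v ++ [p.2])]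
    simp [PySem.Dict.keys_empty, PySem.Set.update, PySem.Set.ofList]
  rw [hkeys]
  apply List.map_congr_left
  intro k _
  rw [PySem.Dict.getD_foldl_modify_append]
  simp [PySem.Dict.getD_empty, pvVals]

-- B's sweep over a run of items that all carry the open group's key just extends that group
theorem pv_foldl_run (k : String × String) (vs : List (String × String)) :
    ∀ (acc : List (String × String)) (g : List ((String × String) × (List (String × String)))),
    (vs.map (fun v => (k, v))).foldl pvStep (g, some (k, acc)) = (g, some (k, acc ++ vs)) := by
  induction vs with
  | nil => intro acc g; simp
  | cons v vs ih =>
      intro acc g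
      simp only [List.map_cons, List.foldl_cons, pvStep, BEq.rfl, if_pos]
      rw [ih (acc ++ [v]) g]
      simp

-- B's sweep over the concatenated groups of distinct keys, with an open group whose key never recurs
theorem pv_foldl_groups (vals : (String × String) → List (String × String)) :
    ∀ (ks : List (String × String)), ks.Nodup → (∀ k ∈ ks, vals k ≠ []) →
    ∀ (g : List ((String × String) × (List (String × String)))) (c : (String × String) × (List (String × String))),
    c.1 ∉ ks →
    pvFin ((ks.flatMap (fun k => (vals k).map (fun v => (k, v)))).foldl pvStep (g, some c))
      = g ++ c :: ks.map (fun k => (k, vals k)) := by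
  intro ks
  induction ks with
  | nil => intro _ _ g c _; simp [pvFin]
  | cons k ks ih =>
      intro hnd hne g c hc
      obtain ⟨v0, vs, hv⟩ : ∃ v0 vs, vals k = v0 :: vs := by
        rcases h : vals k with _ | ⟨v0, vs⟩
        · exact absurd h (hne k (List.mem_cons_self))
        · exact ⟨v0, vs, rfl⟩
      have hck : ¬ (c.1 == k) = true := by
        simp only [beq_iff_eq]; exact fun h => hc (h ▸ List.mem_cons_self)
      rw [List.flatMap_cons, List.foldl_append, hv]
      simp only [List.map_cons, List.foldl_cons, pvStep, hck, if_neg, Bool.false_eq_true,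
        not_false_eq_true]
      rw [pv_foldl_run k vs [v0] (g ++ [c])]
      have hk_not : (k, v0 :: vs).1 ∉ ks := by
        simpa using (List.nodup_cons.mp hnd).1
      rw [show ([v0] ++ vs) = vals k from by simp [hv]]
      rw [ih (List.nodup_cons.mp hnd).2 (fun k' h' => hne k' (List.mem_cons_of_mem _ h')) (g ++ [c]) (k, vals k) (by simpa using (List.nodup_cons.mp hnd).1)]
      simp

-- starting the sweep with no open group
theorem pv_foldl_groups0 (vals : (String × String) → List (String × String))
    (ks : List (String × String)) (hnd : ks.Nodup) (hne : ∀ k ∈ ks, vals k ≠ []) :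
    pvFin ((ks.flatMap (fun k => (vals k).map (fun v => (k, v)))).foldl pvStep ([], none))
      = ks.map (fun k => (k, vals k)) := by
  cases ks with
  | nil => simp [pvFin]
  | cons k ks =>
      obtain ⟨v0, vs, hv⟩ : ∃ v0 vs, vals k = v0 :: vs := by
        rcases h : vals k with _ | ⟨v0, vs⟩
        · exact absurd h (hne k (List.mem_cons_self))
        · exact ⟨v0, vs, rfl⟩
      rw [List.flatMap_cons, List.foldl_append, hv]
      simp only [List.map_cons, List.foldl_cons, pvStep]
      rw [pv_foldl_run k vs [v0] []]
      rw [show ([v0] ++ vs) = vals k from by simp [hv]]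
      have := pv_foldl_groups vals ks (List.nodup_cons.mp hnd).2
        (fun k' h' => hne k' (List.mem_cons_of_mem _ h')) [] (k, vals k)
        (by simpa using (List.nodup_cons.mp hnd).1)
      rw [this]
      simp

-- pointwise-permutation congruence for flatMap
theorem pv_flatMap_perm_congr {α β : Type} (ks : List α) (f g : α → List β)
    (h : ∀ k ∈ ks, (f k).Perm (g k)) : (ks.flatMap f).Perm (ks.flatMap g) := by
  induction ks with
  | nil => simp
  | cons k ks ih =>
      simp only [List.flatMap_cons]
      exact (h k List.mem_cons_self).append (ih (fun k' h' => h k' (List.mem_cons_of_mem _ h')))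

-- splitting a list into its per-key filters along a nodup cover of its keys is a permutation
theorem pv_filter_flatMap_perm :
    ∀ (ks : List (String × String)) (l : List ((String × String) × (String × String))),
    ks.Nodup → (∀ x ∈ l, x.1 ∈ ks) →
    (ks.flatMap (fun k => l.filter (fun q => q.1 == k))).Perm l := by
  intro ks
  induction ks with
  | nil =>
      intro l _ hcov
      have : l = [] := by
        cases l with
        | nil => rfl
        | cons x xs => exact absurd (hcov x List.mem_cons_self) (List.not_mem_nil)
      simp [this]
  | cons k ks ih =>
      intro l hnd hcov
      rw [List.flatMap_cons]
      have hrest : ∀ k' ∈ ks, l.filter (fun q => q.1 == k')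
          = (l.filter (fun q => !(q.1 == k))).filter (fun q => q.1 == k') := by
        intro k' hk'
        rw [List.filter_filter]
        apply List.filter_congr
        intro x _
        rcases h : (x.1 == k') with _ | _
        · simp
        · have : x.1 = k' := by simpa using h
          have : ¬ (x.1 == k) = true := by
            simp only [beq_iff_eq, this]
            exact fun he => (List.nodup_cons.mp hnd).1 (he ▸ hk')
          simp [this]
      have hflat : (ks.flatMap (fun k' => l.filter (fun q => q.1 == k')))
          = ks.flatMap (fun k' => (l.filter (fun q => !(q.1 == k))).filter (fun q => q.1 == k')) := by
        apply List.flatMap_congr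
        intro k' hk'
        exact hrest k' hk'
      rw [hflat]
      have hperm := ih (l.filter (fun q => !(q.1 == k))) (List.nodup_cons.mp hnd).2
        (fun x hx => by
          have hx' := List.mem_filter.mp hx
          have := hcov x hx'.1
          rcases List.mem_cons.mp this with h | h
          · exact absurd (by simpa using h) (by simpa using hx'.2)
          · exact h)
      exact (hperm.append_left _).trans (List.filter_append_perm _ l)

-- each sorted suffix group, re-tagged with its key, is a permutation of that key's filter of the items
theorem pv_group_perm (items : List ((String × String) × (String × String))) (k : String × String) :
    ((pvVals items k).map (fun v => (k, v))).Perm (items.filter (fun q => q.1 == k)) := by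
  have h1 : (pvVals items k).Perm ((items.filter (fun q => q.1 == k)).map Prod.snd) :=
    PySem.List.sorted2_perm _ _ _ _
  have h2 := h1.map (fun v => (k, v))
  have h3 : ((items.filter (fun q => q.1 == k)).map Prod.snd).map (fun v => (k, v))
      = items.filter (fun q => q.1 == k) := by
    rw [List.map_map]
    have : ∀ x ∈ items.filter (fun q => q.1 == k), ((fun v => (k, v)) ∘ Prod.snd) x = id x := by
      intro x hx
      have : x.1 = k := by simpa using (List.mem_filter.mp hx).2
      simp [Function.comp, ← this]
    rw [List.map_congr_left this, List.map_id]
  exact h3 ▸ h2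

-- the canonical list is a permutation of the items
theorem pv_canon_perm (items : List ((String × String) × (String × String))) :
    (pvCanon items).Perm items := by
  unfold pvCanon
  have hnd : (pvKeys items).Nodup :=
    ((PySem.List.sorted2_perm _ _ _ _).symm).nodup (PySem.Set.nodup_ofList _)
  have hcov : ∀ x ∈ items, x.1 ∈ pvKeys items := by
    intro x hx
    have : x.1 ∈ PySem.Set.ofList (items.map Prod.fst) :=
      (PySem.Set.mem_ofList _ _).mpr (List.mem_map_of_mem hx)
    exact ((PySem.List.sorted2_perm _ _ _ _).mem_iff).mpr this
  exact (pv_flatMap_perm_congr _ _ _ (fun k _ => pv_group_perm items k)).trans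
    (pv_filter_flatMap_perm (pvKeys items) items hnd hcov)

-- pairwise-sortedness of concatenated groups: strictly increasing keys, each group value-sorted
theorem pv_flatMap_pairwise (vals : (String × String) → List (String × String)) :
    ∀ (ks : List (String × String)), ks.Pairwise (fun a b => toLex a < toLex b) →
    (∀ k, (vals k).Pairwise (fun a b => toLex a ≤ toLex b)) →
    (ks.flatMap (fun k => (vals k).map (fun v => (k, v)))).Pairwise (fun a b => pvKey4 a ≤ pvKey4 b) := by
  intro ks hks hvals
  induction hks with
  | nil => simp
  | @cons k ks hk hks ih =>
      rw [List.flatMap_cons, List.pairwise_append]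
      refine ⟨?_, ih, ?_⟩
      · exact (hvals k).map _ (fun {a b} hab => by
          unfold pvKey4
          rw [Prod.Lex.toLex_le_toLex]
          exact Or.inr ⟨rfl, hab⟩)
      · intro a ha b hb
        obtain ⟨v, _, rfl⟩ := List.mem_map.mp ha
        obtain ⟨k', hk', hb'⟩ := List.mem_flatMap.mp hb
        obtain ⟨v', _, rfl⟩ := List.mem_map.mp hb'
        unfold pvKey4
        rw [Prod.Lex.toLex_le_toLex]
        exact Or.inl (hk k' hk')

-- the canonical list is pvKey4-sorted
theorem pv_canon_pairwise (items : List ((String × String) × (String × String))) :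
    (pvCanon items).Pairwise (fun a b => pvKey4 a ≤ pvKey4 b) := by
  unfold pvCanon
  have hkeys : (pvKeys items).Pairwise (fun a b => toLex a < toLex b) := by
    have hle : (pvKeys items).Pairwise (fun a b => toLex a ≤ toLex b) := by
      unfold pvKeys
      rw [pv_sorted2_eq_sorted_toLex]
      exact PySem.List.sorted_pairwise _ _
    have hnd : (pvKeys items).Nodup :=
      ((PySem.List.sorted2_perm _ _ _ _).symm).nodup (PySem.Set.nodup_ofList _)
    exact (hle.and hnd).imp (fun {a b} h =>
      lt_of_le_of_ne h.1 (fun he => h.2 (congrArg ofLex he)))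
  have hvals : ∀ k, (pvVals items k).Pairwise (fun a b => toLex a ≤ toLex b) := by
    intro k
    unfold pvVals
    rw [pv_sorted2_eq_sorted_toLex]
    exact PySem.List.sorted_pairwise _ _
  exact pv_flatMap_pairwise (pvVals items) (pvKeys items) hkeys hvals

-- sorting the items gives exactly the canonical list
theorem pv_sorted_eq_canon (items : List ((String × String) × (String × String))) :
    PySem.List.sorted items pvKey4 = pvCanon items := by
  rw [PySem.List.sorted_eq_sorted_of_perm items (pvCanon items) pvKey4 pv_pvKey4_injective
    (pv_canon_perm items).symm]
  exact PySem.List.sorted_eq_self_of_pairwise _ _ (pv_canon_pairwise items)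

-- no prefix has an empty suffix group
theorem pv_vals_ne_nil (items : List ((String × String) × (String × String)))
    (k : String × String) (hk : k ∈ pvKeys items) : pvVals items k ≠ [] := by
  unfold pvVals
  rw [pv_sorted2_eq_sorted_toLex]
  rw [Ne, PySem.List.sorted_eq_nil_iff]
  have hk' : k ∈ items.map Prod.fst :=
    (PySem.Set.mem_ofList _ _).mp (((PySem.List.sorted2_perm _ _ _ _).mem_iff).mp hk)
  obtain ⟨x, hx, hxk⟩ := List.mem_map.mp hk'
  intro hnil
  have : x ∈ items.filter (fun q => q.1 == k) :=
    List.mem_filter.mpr ⟨hx, by simp [hxk]⟩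
  have := List.mem_map_of_mem (f := Prod.snd) this
  rw [hnil] at this
  exact List.not_mem_nil this

-- ===== VERDICT =====
theorem debruijn_from_pair_spec : Claim_equal_debruijn_from_pair := by
  intro d pairs _
  unfold Spec_debruijn_from_pair
  rw [pv_a_char]
  unfold debruijn_from_pair_alt
  rw [pv_sorted_eq_canon]
  unfold pvCanon
  rw [pv_foldl_groups0 (pvVals (pairs.map pvItem)) (pvKeys (pairs.map pvItem))
    (((PySem.List.sorted2_perm _ _ _ _).symm).nodup (PySem.Set.nodup_ofList _))
    (fun k hk => pv_vals_ne_nil _ k hk)]
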